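-- pv_equiv track=rewrite | github.com/hmcneill46/NYTGamesJsonCreator | StrandsSolver.py | check_spangram_separation_rule
-- ===== SOURCE A (Python) =====
-- def check_spangram_separation_rule(path, grid, node_to_coord, remaining_strands, min_free=10):
--     """
--     After placing the spangram, ensure that removing its nodes splits the grid into exactly two
--     connected free regions, each with at least min_free nodes, and that the free regions can be
--     exactly filled by some combination of the remaining strands.
--     """
--     used = set(path)
--     all_nodes = set(node for row in grid for node in row)
--     free_nodes = all_nodes - used
--     free_components = []
--     visited = set()
--     directions = [(-1, 0), (-1, 1), (0, 1), (1, 1),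
--                   (1, 0), (1, -1), (0, -1), (-1, -1)]
--     for node in free_nodes:
--         if node in visited:
--             continue
--         comp_size = 0
--         stack = [node]
--         while stack:
--             cur = stack.pop()
--             if cur in visited:
--                 continue
--             visited.add(cur)
--             comp_size += 1
--             r, c = node_to_coord[cur]
--             for dr, dc in directions:
--                 nr, nc = r + dr, c + dc
--                 if 0 <= nr < len(grid) and 0 <= nc < len(grid[0]):
--                     neighbor = grid[nr][nc]
--                     if neighbor in free_nodes and neighbor not in visited:
--                         stack.append(neighbor)
--         free_components.append(comp_size)
--     # The spangram must split the grid into exactly two free regions.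
--     if len(free_components) != 2:
--         return False
--     # Each region must have at least min_free nodes.
--     if any(comp_size < min_free for comp_size in free_components):
--         return False
--     # Ensure that the free regions can be exactly filled by the remaining strands.
--     if not can_partition_components(free_components, remaining_strands):
--         return False
--     return True
--
-- def can_partition_components(component_sizes, strands):
--     if not component_sizes:
--         return len(strands) == 0
--     component_sizes = sorted(component_sizes, reverse=True)
--     target = component_sizes[0]
--
--     subsets = []
--     def find_subsets(i, current, current_sum):
--         if current_sum == target:
--             subsets.append(current[:])
--             return
--         if i >= len(strands) or current_sum > target:
--             return
--         current.append(i)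
--         find_subsets(i+1, current, current_sum + strands[i])
--         current.pop()
--         find_subsets(i+1, current, current_sum)
--     find_subsets(0, [], 0)
--     if not subsets:
--         return False
--     for subset in subsets:
--         remaining = [strands[i] for i in range(len(strands)) if i not in subset]
--         if can_partition_components(component_sizes[1:], remaining):
--             return True
--     return False
-- ===== SOURCE B (Python) =====
-- def check_spangram_separation_rule(path, grid, node_to_coord, remaining_strands, min_free=10):
--     """Alternative implementation: deterministic grid-scan seeding + breadth-first
--     frontier expansion instead of A's set-iteration seeding + explicit-stack DFS.
--     Downstream logic (two-region check, min_free check, partition check) unchanged."""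
--     used = set(path)
--     free = set(n for row in grid for n in row) - used
--     rows = len(grid)
--     cols = len(grid[0]) if grid else 0
--
--     def neighbors(x):
--         r, c = node_to_coord[x]
--         out = []
--         for dr, dc in ((-1, 0), (-1, 1), (0, 1), (1, 1),
--                        (1, 0), (1, -1), (0, -1), (-1, -1)):
--             nr, nc = r + dr, c + dc
--             if 0 <= nr < rows and 0 <= nc < cols:
--                 m = grid[nr][nc]
--                 if m in free:
--                     out.append(m)
--         return out
--
--     sizes = []
--     seen = set()
--     for row in grid:              # seeds in grid-scan order, not set order
--         for n in row:
--             if n not in free or n in seen: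
--                 continue
--             seen.add(n)
--             size = 1
--             frontier = [n]
--             while frontier:       # breadth-first: expand whole frontier per round
--                 nxt = []
--                 for x in frontier:
--                     for m in neighbors(x):
--                         if m not in seen:
--                             seen.add(m)
--                             size += 1
--                             nxt.append(m)
--                 frontier = nxt
--             sizes.append(size)
--
--     if len(sizes) != 2:
--         return False
--     if any(s < min_free for s in sizes):
--         return False
--     if not can_partition_components(sizes, remaining_strands):
--         return False
--     return True
--
--
-- # unchanged from A: only the multiset of component sizes matters downstream
-- def can_partition_components(component_sizes, strands):
--     if not component_sizes:
--         return len(strands) == 0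
--     component_sizes = sorted(component_sizes, reverse=True)
--     target = component_sizes[0]
--
--     subsets = []
--     def find_subsets(i, current, current_sum):
--         if current_sum == target:
--             subsets.append(current[:])
--             return
--         if i >= len(strands) or current_sum > target:
--             return
--         current.append(i)
--         find_subsets(i+1, current, current_sum + strands[i])
--         current.pop()
--         find_subsets(i+1, current, current_sum)
--     find_subsets(0, [], 0)
--     if not subsets:
--         return False
--     for subset in subsets:
--         remaining = [strands[i] for i in range(len(strands)) if i not in subset]
--         if can_partition_components(component_sizes[1:], remaining):
--             return True
--     return False
-- ===== Notes on version B (the rewrite author's own statement) =====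
-- stated objective: alternative
-- what changed: Component discovery is rewritten: instead of iterating the free-node set and flood-filling with an explicit LIFO stack, B scans the grid in row-major order for seeds and grows each region by breadth-first frontier expansion through a neighbors() helper; the downstream two-region / min_free / partition logic is unchanged, since only the multiset of component sizes matters there.
import Mathlib
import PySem

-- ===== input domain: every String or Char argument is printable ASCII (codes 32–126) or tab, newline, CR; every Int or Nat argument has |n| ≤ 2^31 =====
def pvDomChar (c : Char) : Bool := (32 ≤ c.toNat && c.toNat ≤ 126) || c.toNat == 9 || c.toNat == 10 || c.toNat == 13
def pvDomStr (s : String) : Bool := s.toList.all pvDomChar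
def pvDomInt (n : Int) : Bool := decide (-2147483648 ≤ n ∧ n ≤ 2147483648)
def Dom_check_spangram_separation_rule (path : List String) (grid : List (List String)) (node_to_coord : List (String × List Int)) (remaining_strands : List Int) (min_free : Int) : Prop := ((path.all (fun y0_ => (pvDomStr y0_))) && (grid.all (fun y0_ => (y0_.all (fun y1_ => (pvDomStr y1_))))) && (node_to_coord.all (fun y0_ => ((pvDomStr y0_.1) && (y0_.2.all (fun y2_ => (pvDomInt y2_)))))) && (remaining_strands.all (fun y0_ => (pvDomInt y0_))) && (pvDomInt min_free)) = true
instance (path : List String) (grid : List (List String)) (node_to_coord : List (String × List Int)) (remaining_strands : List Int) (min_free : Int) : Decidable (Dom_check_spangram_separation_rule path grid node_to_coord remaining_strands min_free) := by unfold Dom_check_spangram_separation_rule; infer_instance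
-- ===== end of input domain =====

-- B replaces A's set-iteration seeding + explicit-stack DFS flood fill by deterministic
-- grid-scan seeding + breadth-first frontier expansion (objective: alternative traversal,
-- same downstream two-region / min_free / partition logic).

-- ===== shared helpers (used by both ports; each Python computes these the same way) =====

-- the 8 probe directions, in source order
def pvDirs : List (Int × Int) :=
  [(-1, 0), (-1, 1), (0, 1), (1, 1), (1, 0), (1, -1), (0, -1), (-1, -1)]

-- len(grid[0]) (only consulted when grid is nonempty)
def pvWidth (grid : List (List String)) : Int := (grid.headI.length : Int)

-- grid[r][c] for in-bounds r, c ≥ 0 (both Pythons only read it after the bounds test)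
def pvCell (grid : List (List String)) (r c : Int) : String :=
  (grid.getD r.toNat []).getD c.toNat ""

-- the grid's cells in row-major (generator) order
def pvFlat (grid : List (List String)) : List String := grid.flatMap (fun r => r)

-- free_nodes = set(node for row in grid for node in row) - set(path)
def pvFree (path : List String) (grid : List (List String)) : PySem.Set String :=
  PySem.Set.diff (PySem.Set.ofList (pvFlat grid)) path

-- the in-bounds 8-neighbourhood cells of x's recorded coordinate that are free,
-- in direction order (both Pythons run exactly this bounds-then-membership test)
def pvNbrs (grid : List (List String)) (node_to_coord : List (String × List Int))
    (free : List String) (x : String) : List String :=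
  match node_to_coord.lookup x with
  | some [r, c] =>
      pvDirs.foldl (fun acc d =>
        if (decide (0 ≤ r + d.1) && decide (r + d.1 < (grid.length : Int)) &&
            decide (0 ≤ c + d.2) && decide (c + d.2 < pvWidth grid) &&
            free.contains (pvCell grid (r + d.1) (c + d.2))) = true
        then acc ++ [pvCell grid (r + d.1) (c + d.2)] else acc) []
  | _ => []

-- can_partition_components / find_subsets: identical in Source A and Source B (shared helper)
def pvFindSubsets (strands : List Int) (target : Int) (i : Nat) (cur : List Nat)
    (csum : Int) : List (List Nat) :=
  if csum = target then [cur]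
  else if _h : strands.length ≤ i ∨ target < csum then []
  else pvFindSubsets strands target (i + 1) (cur ++ [i]) (csum + strands.getD i 0)
       ++ pvFindSubsets strands target (i + 1) cur csum
termination_by strands.length - i
decreasing_by all_goals omega

def pvCanPartition : List Int → List Int → Bool
  | [], strands => strands.isEmpty
  | c :: cs, strands =>
    match h : PySem.List.sorted (c :: cs) (fun x => x) true with
    | [] => false  -- unreachable: sorted of a nonempty list is nonempty
    | target :: restCs =>
      let subsets := pvFindSubsets strands target 0 [] 0
      if subsets.isEmpty then false
      else subsets.any (fun sub =>
        pvCanPartition restCs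
          (((List.range strands.length).filter (fun i => !(sub.contains i))).map
            (fun i => strands.getD i 0)))
termination_by cs _ => cs.length
decreasing_by
  have hl := PySem.List.length_sorted (c :: cs) (fun x : Int => x) true
  rw [h] at hl; simp at hl ⊢; omega

-- ===== PORT A =====

-- the inner `while stack:` loop; fuel is spent once per pop and never runs out
-- (proved below: 9·|free| + 2 pops suffice)
def pvDfs (grid : List (List String)) (node_to_coord : List (String × List Int))
    (free : List String) : Nat → List String → PySem.Set String → Int →
    PySem.Set String × Int
  | 0, _, visited, size => (visited, size)
  | _ + 1, [], visited, size => (visited, size)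
  | fuel + 1, cur :: rest, visited, size =>
    if PySem.Set.contains visited cur then pvDfs grid node_to_coord free fuel rest visited size
    else
      let visited' := PySem.Set.add visited cur
      let stack' := (pvNbrs grid node_to_coord free cur).foldl
        (fun s m => if PySem.Set.contains visited' m then s else m :: s) rest
      pvDfs grid node_to_coord free fuel stack' visited' (size + 1)

def check_spangram_separation_rule (path : List String) (grid : List (List String)) (node_to_coord : List (String × List Int)) (remaining_strands : List Int) (min_free : Int) : Bool :=
  let free := pvFree path grid
  let st := free.foldl (fun (st : List Int × PySem.Set String) node =>
    if PySem.Set.contains st.2 node then st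
    else
      let r := pvDfs grid node_to_coord free (9 * free.length + 2) [node] st.2 0
      (st.1 ++ [r.2], r.1)) ([], PySem.Set.empty)
  let comps := st.1
  if comps.length ≠ 2 then false
  else if comps.any (fun s => decide (s < min_free)) then false
  else if ¬ pvCanPartition comps remaining_strands then false
  else true

-- ===== PORT B =====

-- one round of frontier expansion: state (seen, size, next frontier)
def pvBfsRound (grid : List (List String)) (node_to_coord : List (String × List Int))
    (free : List String) (frontier : List String)
    (st : PySem.Set String × Int × List String) : PySem.Set String × Int × List String :=
  frontier.foldl (fun st x =>
    (pvNbrs grid node_to_coord free x).foldl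
      (fun (st : PySem.Set String × Int × List String) m =>
        if PySem.Set.contains st.1 m then st
        else (PySem.Set.add st.1 m, st.2.1 + 1, st.2.2 ++ [m])) st) st

-- the `while frontier:` loop; fuel is spent once per round (|free| + 2 rounds suffice)
def pvBfs (grid : List (List String)) (node_to_coord : List (String × List Int))
    (free : List String) : Nat → PySem.Set String → Int → List String →
    PySem.Set String × Int
  | 0, seen, size, _ => (seen, size)
  | _ + 1, seen, size, [] => (seen, size)
  | fuel + 1, seen, size, frontier =>
    let r := pvBfsRound grid node_to_coord free frontier (seen, size, [])
    pvBfs grid node_to_coord free fuel r.1 r.2.1 r.2.2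

def check_spangram_separation_rule_alt (path : List String) (grid : List (List String)) (node_to_coord : List (String × List Int)) (remaining_strands : List Int) (min_free : Int) : Bool :=
  let free := pvFree path grid
  let st := grid.foldl (fun st row =>
    row.foldl (fun (st : PySem.Set String × List Int) n =>
      if !(PySem.Set.contains free n) || PySem.Set.contains st.1 n then st
      else
        let r := pvBfs grid node_to_coord free (free.length + 2) (PySem.Set.add st.1 n) 1 [n]
        (r.1, st.2 ++ [r.2])) st) (PySem.Set.empty, [])
  let comps := st.2
  if comps.length ≠ 2 then false
  else if comps.any (fun s => decide (s < min_free)) then false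
  else if ¬ pvCanPartition comps remaining_strands then false
  else true

-- ===== PRECONDITION & SPEC =====

-- every probed neighbour cell of n lies inside its (possibly ragged) row
def pvCoordOK (grid : List (List String)) (node_to_coord : List (String × List Int))
    (n : String) : Bool :=
  match node_to_coord.lookup n with
  | some [r, c] =>
      pvDirs.all (fun d =>
        !(decide (0 ≤ r + d.1) && decide (r + d.1 < (grid.length : Int)) &&
          decide (0 ≤ c + d.2) && decide (c + d.2 < pvWidth grid)) ||
        decide (c + d.2 < ((grid.getD (r + d.1).toNat []).length : Int)))
  | _ => false

-- Pre_ excludes (a) inputs on which A raises — a free node missing from node_to_coord,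
-- a coordinate value that is not a pair, or a ragged grid whose short row is hit by a
-- neighbour probe — and (b) inputs whose free-node adjacency is asymmetric (node_to_coord
-- inconsistent with the grid), on which A's result depends on Python's hash-randomised
-- set iteration order, so no single value is A's to match.
def Pre_check_spangram_separation_rule (path : List String) (grid : List (List String)) (node_to_coord : List (String × List Int)) (remaining_strands : List Int) (min_free : Int) : Prop :=
  (∀ n ∈ pvFree path grid, pvCoordOK grid node_to_coord n = true) ∧
  (∀ n ∈ pvFree path grid, ∀ m ∈ pvFree path grid,
    m ∈ pvNbrs grid node_to_coord (pvFree path grid) n →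
    n ∈ pvNbrs grid node_to_coord (pvFree path grid) m)
instance (path : List String) (grid : List (List String)) (node_to_coord : List (String × List Int)) (remaining_strands : List Int) (min_free : Int) : Decidable (Pre_check_spangram_separation_rule path grid node_to_coord remaining_strands min_free) := by unfold Pre_check_spangram_separation_rule; infer_instance

def pvWitness_check_spangram_separation_rule : List String × List (List String) × (List (String × List Int)) × List Int × Int :=
  (["b"], [["a", "b", "c"]], [("a", [0, 0]), ("b", [0, 1]), ("c", [0, 2])], [1, 1], 1)

def Spec_check_spangram_separation_rule (path : List String) (grid : List (List String)) (node_to_coord : List (String × List Int)) (remaining_strands : List Int) (min_free : Int) (out : Bool) : Prop := out = check_spangram_separation_rule_alt path grid node_to_coord remaining_strands min_free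
instance (path : List String) (grid : List (List String)) (node_to_coord : List (String × List Int)) (remaining_strands : List Int) (min_free : Int) (out : Bool) : Decidable (Spec_check_spangram_separation_rule path grid node_to_coord remaining_strands min_free out) := by unfold Spec_check_spangram_separation_rule; infer_instance

-- ===== CLAIM (what is proved, stated in full; the proofs are below) =====
def Claim_equal_check_spangram_separation_rule : Prop := ∀ (path : List String) (grid : List (List String)) (node_to_coord : List (String × List Int)) (remaining_strands : List Int) (min_free : Int), Dom_check_spangram_separation_rule path grid node_to_coord remaining_strands min_free → Pre_check_spangram_separation_rule path grid node_to_coord remaining_strands min_free → Spec_check_spangram_separation_rule path grid node_to_coord remaining_strands min_free (check_spangram_separation_rule path grid node_to_coord remaining_strands min_free)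

-- ===== LEMMAS AND PROOFS =====

-- ---- the common mathematical spec: reachable sets of the free-neighbour relation ----

-- one saturation step of reachability, avoiding V
def pvExpand (nb : String → List String) (V S : Finset String) : Finset String :=
  S ∪ ((S.biUnion fun x => (nb x).toFinset) \ V)

def pvRk (nb : String → List String) (V : Finset String) (n : String) : Nat → Finset String
  | 0 => {n}
  | k + 1 => pvExpand nb V (pvRk nb V n k)

-- the set reachable from n along nb-edges avoiding V (U bounds the saturation)
def pvR (nb : String → List String) (U V : Finset String) (n : String) : Finset String :=
  pvRk nb V n (U.card + 1)

def pvStep (nb : String → List String) (V : Finset String) (u v : String) : Prop :=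
  v ∈ nb u ∧ v ∉ V

def pvRel (nb : String → List String) (V : Finset String) : String → String → Prop :=
  Relation.ReflTransGen (pvStep nb V)

-- union of the reach-sets of the unvisited stack elements
def pvAcc (nb : String → List String) (U V : Finset String) (L : List String) : Finset String :=
  (L.toFinset.filter (fun a => a ∉ V)).biUnion (fun a => pvR nb U V a)

-- the canonical seed-processing fold both ports are reduced to
def pvRun (nb : String → List String) (U : Finset String) (l : List String)
    (st : List Int × Finset String) : List Int × Finset String :=
  l.foldl (fun st n => if n ∈ st.2 then st
    else (st.1 ++ [((pvR nb U st.2 n).card : Int)], st.2 ∪ pvR nb U st.2 n)) st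

theorem pvRk_extensive (nb : String → List String) (V : Finset String) (n : String) (k : Nat) :
    pvRk nb V n k ⊆ pvRk nb V n (k + 1) := by
  intro b hb
  exact Finset.mem_union.2 (Or.inl hb)


theorem pvRk_subset (nb : String → List String) (U : Finset String)
    (hnb : ∀ x, ∀ m ∈ nb x, m ∈ U) (V : Finset String) (n : String) (k : Nat) :
    pvRk nb V n k ⊆ insert n U := by
  induction k with
  | zero => intro b hb; simp [pvRk] at hb; simp [hb]
  | succ k ih =>
    intro b hb
    rcases Finset.mem_union.1 hb with h | h
    · exact ih h
    · rcases Finset.mem_sdiff.1 h with ⟨h1, _⟩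
      rcases Finset.mem_biUnion.1 h1 with ⟨x, _, hx2⟩
      exact Finset.mem_insert_of_mem (hnb x b (List.mem_toFinset.1 hx2))


theorem pvR_fix (nb : String → List String) (U : Finset String)
    (hnb : ∀ x, ∀ m ∈ nb x, m ∈ U) (V : Finset String) (n : String) :
    pvExpand nb V (pvR nb U V n) = pvR nb U V n := by
  have hchain : ∀ k, pvRk nb V n k ⊆ pvRk nb V n (k + 1) := pvRk_extensive nb V n
  have hstab : ∀ k, pvRk nb V n k = pvRk nb V n (k + 1) →
      ∀ j, pvRk nb V n (k + j) = pvRk nb V n k := by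
    intro k hk j
    induction j with
    | zero => rfl
    | succ j ih =>
      have : pvRk nb V n (k + (j + 1)) = pvExpand nb V (pvRk nb V n (k + j)) := rfl
      rw [this, ih]; exact hk.symm
  have hex : ∃ k, k ≤ U.card ∧ pvRk nb V n k = pvRk nb V n (k + 1) := by
    by_contra hno
    push_neg at hno
    have hcard : ∀ k, k ≤ U.card + 1 → k + 1 ≤ (pvRk nb V n k).card := by
      intro k
      induction k with
      | zero => intro _; simp [pvRk]
      | succ k ih =>
        intro hk
        have h1 : k + 1 ≤ (pvRk nb V n k).card := ih (by omega)
        have h2 : pvRk nb V n k ⊂ pvRk nb V n (k + 1) :=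
          Finset.ssubset_iff_subset_ne.2 ⟨hchain k, hno k (by omega)⟩
        have := Finset.card_lt_card h2
        omega
    have h1 := hcard (U.card + 1) le_rfl
    have h2 : (pvRk nb V n (U.card + 1)).card ≤ (insert n U).card :=
      Finset.card_le_card (pvRk_subset nb U hnb V n (U.card + 1))
    have h3 : (insert n U).card ≤ U.card + 1 := Finset.card_insert_le n U
    omega
  rcases hex with ⟨k, hk, hfix⟩
  have h1 : pvRk nb V n (k + (U.card + 1 - k)) = pvRk nb V n k := hstab k hfix (U.card + 1 - k)
  have h2 : k + (U.card + 1 - k) = U.card + 1 := by omega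
  rw [h2] at h1
  show pvExpand nb V (pvRk nb V n (U.card + 1)) = pvRk nb V n (U.card + 1)
  rw [h1]
  have : pvExpand nb V (pvRk nb V n k) = pvRk nb V n (k + 1) := rfl
  rw [this, ← hfix]


theorem pvR_self (nb : String → List String) (U V : Finset String) (n : String) :
    n ∈ pvR nb U V n := by
  have : ∀ k, n ∈ pvRk nb V n k := by
    intro k
    induction k with
    | zero => simp [pvRk]
    | succ k ih => exact Finset.mem_union.2 (Or.inl ih)
  exact this _


theorem pvR_closed (nb : String → List String) (U : Finset String)
    (hnb : ∀ x, ∀ m ∈ nb x, m ∈ U) (V : Finset String) (n x m : String)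
    (hx : x ∈ pvR nb U V n) (hm : m ∈ nb x) (hv : m ∉ V) : m ∈ pvR nb U V n := by
  rw [← pvR_fix nb U hnb V n]
  by_cases hmem : m ∈ pvR nb U V n
  · exact Finset.mem_union.2 (Or.inl hmem)
  · refine Finset.mem_union.2 (Or.inr (Finset.mem_sdiff.2 ⟨?_, hv⟩))
    exact Finset.mem_biUnion.2 ⟨x, hx, List.mem_toFinset.2 hm⟩


theorem pvR_min (nb : String → List String) (U V : Finset String) (n : String)
    (T : Finset String) (hn : n ∈ T)
    (hcl : ∀ x ∈ T, ∀ m ∈ nb x, m ∉ V → m ∈ T) : pvR nb U V n ⊆ T := by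
  have : ∀ k, pvRk nb V n k ⊆ T := by
    intro k
    induction k with
    | zero => intro b hb; simp [pvRk] at hb; simpa [hb] using hn
    | succ k ih =>
      intro b hb
      rcases Finset.mem_union.1 hb with h | h
      · exact ih h
      · rcases Finset.mem_sdiff.1 h with ⟨h1, h2⟩
        rcases Finset.mem_biUnion.1 h1 with ⟨x, hx1, hx2⟩
        exact hcl x (ih hx1) b (List.mem_toFinset.1 hx2) h2
  exact this _


theorem pvR_avoid (nb : String → List String) (U V : Finset String) (n : String)
    (hn : n ∉ V) : ∀ b ∈ pvR nb U V n, b ∉ V := by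
  have : ∀ k, ∀ b ∈ pvRk nb V n k, b = n ∨ b ∉ V := by
    intro k
    induction k with
    | zero => intro b hb; simp [pvRk] at hb; exact Or.inl hb
    | succ k ih =>
      intro b hb
      rcases Finset.mem_union.1 hb with h | h
      · exact ih b h
      · exact Or.inr (Finset.mem_sdiff.1 h).2
  intro b hb
  rcases this _ b hb with h | h
  · simpa [h] using hn
  · exact h


theorem pvR_mem_iff (nb : String → List String) (U : Finset String)
    (hnb : ∀ x, ∀ m ∈ nb x, m ∈ U) (V : Finset String) (n b : String) :
    b ∈ pvR nb U V n ↔ pvRel nb V n b := by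
  constructor
  · have : ∀ k, ∀ b ∈ pvRk nb V n k, pvRel nb V n b := by
      intro k
      induction k with
      | zero => intro b hb; simp [pvRk] at hb; subst hb; exact Relation.ReflTransGen.refl
      | succ k ih =>
        intro b hb
        rcases Finset.mem_union.1 hb with h | h
        · exact ih b h
        · rcases Finset.mem_sdiff.1 h with ⟨h1, h2⟩
          rcases Finset.mem_biUnion.1 h1 with ⟨x, hx1, hx2⟩
          exact (ih x hx1).tail ⟨List.mem_toFinset.1 hx2, h2⟩
    exact this _ b
  · intro h
    induction h with
    | refl => exact pvR_self nb U V n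
    | tail _ hstep ih => exact pvR_closed nb U hnb V n _ _ ih hstep.1 hstep.2


theorem pvRel_mono (nb : String → List String) (V V' : Finset String) (hVV : V ⊆ V')
    (a b : String) (h : pvRel nb V' a b) : pvRel nb V a b := by
  exact Relation.ReflTransGen.mono (fun a b hab => ⟨hab.1, fun hm => hab.2 (hVV hm)⟩) h


theorem pvRel_peel (nb : String → List String) (V : Finset String) (x a b : String)
    (h : pvRel nb V a b) :
    pvRel nb (insert x V) a b ∨ b = x ∨
      ∃ m, m ∈ nb x ∧ m ∉ insert x V ∧ pvRel nb (insert x V) m b := by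
  induction h with
  | refl => exact Or.inl .refl
  | @tail b c hab hbc ih =>
    rcases hbc with ⟨hmem, hnotV⟩
    by_cases hcx : c = x
    · exact Or.inr (Or.inl hcx)
    · have hc' : c ∉ insert x V := by simp [hcx, hnotV]
      rcases ih with h1 | h2 | ⟨m, hm1, hm2, hm3⟩
      · exact Or.inl (h1.tail ⟨hmem, hc'⟩)
      · subst h2
        exact Or.inr (Or.inr ⟨c, hmem, hc', .refl⟩)
      · exact Or.inr (Or.inr ⟨m, hm1, hm2, hm3.tail ⟨hmem, hc'⟩⟩)


theorem pvAcc_mem (nb : String → List String) (U V : Finset String) (L : List String)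
    (b : String) : b ∈ pvAcc nb U V L ↔ ∃ a ∈ L, a ∉ V ∧ b ∈ pvR nb U V a := by
  unfold pvAcc
  simp only [Finset.mem_biUnion, Finset.mem_filter, List.mem_toFinset]
  constructor
  · rintro ⟨a, ⟨h1, h2⟩, h3⟩; exact ⟨a, h1, h2, h3⟩
  · rintro ⟨a, h1, h2, h3⟩; exact ⟨a, ⟨h1, h2⟩, h3⟩


theorem pvAcc_avoid (nb : String → List String) (U V : Finset String) (L : List String) :
    ∀ b ∈ pvAcc nb U V L, b ∉ V := by
  intro b hb
  rcases (pvAcc_mem nb U V L b).1 hb with ⟨a, _, ha2, ha3⟩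
  exact pvR_avoid nb U V a ha2 b ha3


theorem pvAcc_cons_of_mem (nb : String → List String) (U V : Finset String)
    (L : List String) (x : String) (hx : x ∈ V) :
    pvAcc nb U V (x :: L) = pvAcc nb U V L := by
  unfold pvAcc
  congr 1
  simp [List.toFinset_cons, Finset.filter_insert, hx]


theorem pvAcc_congr (nb : String → List String) (U V : Finset String)
    (L L' : List String)
    (h : L.toFinset.filter (fun a => a ∉ V) = L'.toFinset.filter (fun a => a ∉ V)) :
    pvAcc nb U V L = pvAcc nb U V L' := by
  unfold pvAcc
  rw [h]


-- the DFS step identity: popping an unvisited x marks x and seeds its neighbours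
theorem pvAcc_stepid (nb : String → List String) (U : Finset String)
    (hnb : ∀ x, ∀ m ∈ nb x, m ∈ U) (V : Finset String) (x : String) (hx : x ∉ V)
    (L : List String) :
    pvAcc nb U V (x :: L) = insert x (pvAcc nb U (insert x V) (nb x ++ L)) := by
  ext b
  simp only [pvAcc_mem, Finset.mem_insert]
  constructor
  · rintro ⟨a, ha1, ha2, ha3⟩
    rw [pvR_mem_iff nb U hnb] at ha3
    by_cases hax : a = x
    · subst hax
      rcases pvRel_peel nb V a a b ha3 with h1 | h2 | ⟨m, hm1, hm2, hm3⟩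
      · rcases Relation.ReflTransGen.cases_head h1 with h | ⟨c, hc1, hc2⟩
        · exact Or.inl h.symm
        · refine Or.inr ⟨c, List.mem_append_left _ hc1.1, by simpa using hc1.2, ?_⟩
          rw [pvR_mem_iff nb U hnb]; exact hc2
      · exact Or.inl h2
      · refine Or.inr ⟨m, List.mem_append_left _ hm1, by simpa using hm2, ?_⟩
        rw [pvR_mem_iff nb U hnb]; exact hm3
    · rcases pvRel_peel nb V x a b ha3 with h1 | h2 | ⟨m, hm1, hm2, hm3⟩
      · have ha' : a ∉ insert x V := by simp [hax, ha2]
        refine Or.inr ⟨a, List.mem_append_right _ ?_, by simpa using ha', ?_⟩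
        · cases ha1 with
          | head => exact absurd rfl hax
          | tail _ h => exact h
        · rw [pvR_mem_iff nb U hnb]; exact h1
      · exact Or.inl h2
      · refine Or.inr ⟨m, List.mem_append_left _ hm1, by simpa using hm2, ?_⟩
        rw [pvR_mem_iff nb U hnb]; exact hm3
  · rintro (hbx | ⟨a, ha1, ha2x, ha3⟩)
    · subst hbx
      exact ⟨b, List.mem_cons_self .., hx, pvR_self nb U V b⟩
    · have ha2 : a ∉ insert x V := by simpa using ha2x
      have ha2' : a ∉ V := fun h => ha2 (Finset.mem_insert_of_mem h)
      have hax : a ≠ x := fun h => ha2 (by simp [h])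
      rw [pvR_mem_iff nb U hnb] at ha3
      have hrel : pvRel nb V a b :=
        pvRel_mono nb V (insert x V) (Finset.subset_insert x V) a b ha3
      rcases List.mem_append.1 ha1 with h | h
      · refine ⟨x, List.mem_cons_self .., hx, ?_⟩
        rw [pvR_mem_iff nb U hnb]
        exact Relation.ReflTransGen.head ⟨h, ha2'⟩ hrel
      · refine ⟨a, List.mem_cons_of_mem _ h, ha2', ?_⟩
        rw [pvR_mem_iff nb U hnb]; exact hrel



-- ---- bridging the ports' data structures to the spec ----

theorem pvSet_add_toFinset (s : PySem.Set String) (x : String) :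
    (PySem.Set.add s x).toFinset = insert x s.toFinset := by
  simp [PySem.Set.add_eq_ite]
  split
  · exact (Finset.insert_eq_self.2 (by simp_all)).symm
  · rw [List.toFinset_append]; simp

theorem pvNbrs_mem_free (grid : List (List String)) (ntc : List (String × List Int))
    (free : List String) (x m : String) (h : m ∈ pvNbrs grid ntc free x) : m ∈ free := by
  unfold pvNbrs at h
  split at h
  · rw [PySem.List.foldl_append_if] at h
    simp only [List.nil_append, List.mem_map, List.mem_filter] at h
    rcases h with ⟨d, ⟨_, hp⟩, hf⟩
    simp only [Bool.and_eq_true] at hp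
    subst hf
    simpa using hp.2
  · simp at h

theorem pvNbrs_len_le (grid : List (List String)) (ntc : List (String × List Int))
    (free : List String) (x : String) : (pvNbrs grid ntc free x).length ≤ 8 := by
  unfold pvNbrs
  split
  · rw [PySem.List.foldl_append_if]
    simp only [List.nil_append, List.length_map]
    calc (List.filter _ pvDirs).length ≤ pvDirs.length := List.length_filter_le _ _
    _ = 8 := rfl
  · simp

theorem pvAcc_nil (nb : String → List String) (U V : Finset String) :
    pvAcc nb U V [] = ∅ := by
  simp [pvAcc]

-- the python `for … : stack.append(m)` push loop, as a reversed filter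
theorem pvPush_eq (V' : PySem.Set String) (ms rest : List String) :
    ms.foldl (fun s m => if PySem.Set.contains V' m then s else m :: s) rest =
      (ms.filter (fun m => !(PySem.Set.contains V' m))).reverse ++ rest := by
  induction ms generalizing rest with
  | nil => simp
  | cons m ms ih =>
    rw [List.foldl_cons, List.filter_cons]
    by_cases hm : PySem.Set.contains V' m = true
    · rw [if_pos hm, ih, hm]
      simp
    · rw [if_neg hm, ih]
      have hm' : PySem.Set.contains V' m = false := by simpa using hm
      rw [hm']
      simp

-- ---- correctness of A's stack DFS against the reach-set spec ----

theorem pvDfs_spec (grid : List (List String)) (ntc : List (String × List Int))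
    (free : List String) :
    ∀ (fuel : Nat) (stack : List String) (visited : PySem.Set String) (size : Int),
    visited.Nodup → (∀ y ∈ stack, y ∈ free) →
    stack.length + 9 * (free.toFinset \ visited.toFinset).card + 1 ≤ fuel →
    ((pvDfs grid ntc free fuel stack visited size).1.Nodup ∧
     (pvDfs grid ntc free fuel stack visited size).1.toFinset =
       visited.toFinset ∪
         pvAcc (pvNbrs grid ntc free) free.toFinset visited.toFinset stack ∧
     (pvDfs grid ntc free fuel stack visited size).2 =
       size + ((pvAcc (pvNbrs grid ntc free) free.toFinset visited.toFinset stack).card : Int)) := by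
  have hnb : ∀ x, ∀ m ∈ pvNbrs grid ntc free x, m ∈ free.toFinset := fun x m hm =>
    List.mem_toFinset.2 (pvNbrs_mem_free grid ntc free x m hm)
  intro fuel
  induction fuel with
  | zero => intro stack visited size _ _ hfuel; omega
  | succ fuel ih =>
    intro stack visited size hnd hst hfuel
    match stack with
    | [] =>
      simp [pvDfs, pvAcc_nil, hnd]
    | cur :: rest =>
      by_cases hc : PySem.Set.contains visited cur = true
      · have hcv : cur ∈ visited.toFinset :=
          List.mem_toFinset.2 ((PySem.Set.contains_iff _ _).1 hc)
        have hred : pvDfs grid ntc free (fuel + 1) (cur :: rest) visited size =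
            pvDfs grid ntc free fuel rest visited size := by
          simp only [pvDfs]
          rw [if_pos hc]
        rw [hred, pvAcc_cons_of_mem _ _ _ _ _ hcv]
        exact ih rest visited size hnd (fun y hy => hst y (List.mem_cons_of_mem _ hy))
          (by simp at hfuel ⊢; omega)
      · have hcv : cur ∉ visited.toFinset := fun h =>
          hc ((PySem.Set.contains_iff _ _).2 (List.mem_toFinset.1 h))
        have hcf : cur ∈ free := hst cur List.mem_cons_self
        set visited' := PySem.Set.add visited cur with hv'
        set stack' := (pvNbrs grid ntc free cur).foldl
          (fun s m => if PySem.Set.contains visited' m then s else m :: s) rest with hs'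
        have hred : pvDfs grid ntc free (fuel + 1) (cur :: rest) visited size =
            pvDfs grid ntc free fuel stack' visited' (size + 1) := by
          simp only [pvDfs]
          rw [if_neg hc]
        have hv'f : visited'.toFinset = insert cur visited.toFinset :=
          pvSet_add_toFinset visited cur
        have hnd' : visited'.Nodup := PySem.Set.nodup_add _ _ hnd
        have hst' : ∀ y ∈ stack', y ∈ free := by
          intro y hy
          rw [hs', pvPush_eq] at hy
          rcases List.mem_append.1 hy with h | h
          · exact pvNbrs_mem_free grid ntc free cur y
              (List.mem_of_mem_filter (List.mem_reverse.1 h))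
          · exact hst y (List.mem_cons_of_mem _ h)
        have hlen : stack'.length ≤ rest.length + 8 := by
          rw [hs', pvPush_eq]
          have h1 : ((pvNbrs grid ntc free cur).filter
              (fun m => !(PySem.Set.contains visited' m))).length ≤ 8 :=
            le_trans (List.length_filter_le _ _) (pvNbrs_len_le grid ntc free cur)
          rw [List.length_append, List.length_reverse]
          omega
        have hcard : (free.toFinset \ visited'.toFinset).card + 1 =
            (free.toFinset \ visited.toFinset).card := by
          rw [hv'f, Finset.sdiff_insert]
          rw [Finset.card_erase_of_mem (Finset.mem_sdiff.2 ⟨List.mem_toFinset.2 hcf, hcv⟩)]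
          have : 0 < (free.toFinset \ visited.toFinset).card :=
            Finset.card_pos.2 ⟨cur, Finset.mem_sdiff.2 ⟨List.mem_toFinset.2 hcf, hcv⟩⟩
          omega
        have hfuel' : stack'.length + 9 * (free.toFinset \ visited'.toFinset).card + 1 ≤ fuel := by
          simp at hfuel
          omega
        obtain ⟨c1, c2, c3⟩ := ih stack' visited' (size + 1) hnd' hst' hfuel'
        have hACC : pvAcc (pvNbrs grid ntc free) free.toFinset visited'.toFinset stack' =
            pvAcc (pvNbrs grid ntc free) free.toFinset visited'.toFinset
              (pvNbrs grid ntc free cur ++ rest) := by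
          apply pvAcc_congr
          rw [hs', pvPush_eq]
          ext a
          simp only [Finset.mem_filter, List.mem_toFinset, List.mem_append,
            List.mem_reverse, List.mem_filter, Bool.not_eq_eq_eq_not, Bool.not_true]
          constructor
          · rintro ⟨h1 | h1, h2⟩
            · exact ⟨Or.inl h1.1, h2⟩
            · exact ⟨Or.inr h1, h2⟩
          · rintro ⟨h1 | h1, h2⟩
            · refine ⟨Or.inl ⟨h1, ?_⟩, h2⟩
              by_contra hcon
              simp only [Bool.not_eq_false] at hcon
              exact h2 ((PySem.Set.contains_iff _ _).1 hcon)
            · exact ⟨Or.inr h1, h2⟩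
        have hstepid := pvAcc_stepid (pvNbrs grid ntc free) free.toFinset hnb
          visited.toFinset cur hcv rest
        rw [hv'f] at hACC
        have hACC2 : pvAcc (pvNbrs grid ntc free) free.toFinset visited.toFinset
            (cur :: rest) = insert cur (pvAcc (pvNbrs grid ntc free) free.toFinset
              visited'.toFinset stack') := by
          rw [hstepid, ← hACC, hv'f]
        have hnotin : cur ∉ pvAcc (pvNbrs grid ntc free) free.toFinset
            visited'.toFinset stack' := by
          intro h
          have := pvAcc_avoid (pvNbrs grid ntc free) free.toFinset
            visited'.toFinset stack' cur h
          rw [hv'f] at this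
          exact this (Finset.mem_insert_self cur visited.toFinset)
        refine ⟨by rw [hred]; exact c1, by rw [hred, c2, hACC2, hv'f, Finset.insert_union, Finset.union_insert], ?_⟩
        rw [hred, c3, hACC2, Finset.card_insert_of_notMem hnotin]
        push_cast
        ring


-- ---- correctness of B's frontier BFS against the same reach-set spec ----

theorem pvCardSdiff (A B C : Finset String) (hAB : A ⊆ B) (hBC : B ⊆ C) :
    (C \ A).card = (B \ A).card + (C \ B).card := by
  have hU : C \ A = (B \ A) ∪ (C \ B) := by
    ext y
    simp only [Finset.mem_sdiff, Finset.mem_union]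
    constructor
    · rintro ⟨h1, h2⟩
      by_cases hy : y ∈ B
      · exact Or.inl ⟨hy, h2⟩
      · exact Or.inr ⟨h1, hy⟩
    · rintro (⟨h1, h2⟩ | ⟨h1, h2⟩)
      · exact ⟨hBC h1, h2⟩
      · exact ⟨h1, fun h => h2 (hAB h)⟩
  have hd : Disjoint (B \ A) (C \ B) := by
    rw [Finset.disjoint_left]
    intro y hy1 hy2
    rw [Finset.mem_sdiff] at hy1 hy2
    exact hy2.2 hy1.1
  rw [hU, Finset.card_union_of_disjoint hd]

theorem pvAddAll_spec (ms : List String) :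
    ∀ (seen : PySem.Set String) (size : Int) (nxt : List String), seen.Nodup →
    ((ms.foldl (fun (st : PySem.Set String × Int × List String) m =>
        if PySem.Set.contains st.1 m then st
        else (PySem.Set.add st.1 m, st.2.1 + 1, st.2.2 ++ [m])) (seen, size, nxt)).1.Nodup ∧
     (ms.foldl (fun (st : PySem.Set String × Int × List String) m =>
        if PySem.Set.contains st.1 m then st
        else (PySem.Set.add st.1 m, st.2.1 + 1, st.2.2 ++ [m])) (seen, size, nxt)).1.toFinset =
       seen.toFinset ∪ ms.toFinset ∧
     (∀ y, y ∈ (ms.foldl (fun (st : PySem.Set String × Int × List String) m =>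
        if PySem.Set.contains st.1 m then st
        else (PySem.Set.add st.1 m, st.2.1 + 1, st.2.2 ++ [m])) (seen, size, nxt)).2.2 ↔
        y ∈ nxt ∨ (y ∈ ms.toFinset ∧ y ∉ seen.toFinset)) ∧
     (ms.foldl (fun (st : PySem.Set String × Int × List String) m =>
        if PySem.Set.contains st.1 m then st
        else (PySem.Set.add st.1 m, st.2.1 + 1, st.2.2 ++ [m])) (seen, size, nxt)).2.1 =
       size + ((ms.toFinset \ seen.toFinset).card : Int)) := by
  induction ms with
  | nil => intro seen size nxt hnd; refine ⟨hnd, by simp, by simp, by simp⟩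
  | cons m ms ih =>
    intro seen size nxt hnd
    rw [List.foldl_cons]
    by_cases hm : PySem.Set.contains seen m = true
    · have hmF : m ∈ seen.toFinset := List.mem_toFinset.2 ((PySem.Set.contains_iff _ _).1 hm)
      rw [if_pos hm]
      obtain ⟨c1, c2, c3, c4⟩ := ih seen size nxt hnd
      refine ⟨c1, ?_, ?_, ?_⟩
      · rw [c2]
        rw [List.toFinset_cons, Finset.union_insert, Finset.insert_eq_self.2
          (Finset.mem_union.2 (Or.inl hmF))]
      · intro y
        rw [c3 y, List.toFinset_cons]
        constructor
        · rintro (h | ⟨h1, h2⟩)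
          · exact Or.inl h
          · exact Or.inr ⟨Finset.mem_insert_of_mem h1, h2⟩
        · rintro (h | ⟨h1, h2⟩)
          · exact Or.inl h
          · rcases Finset.mem_insert.1 h1 with h1 | h1
            · exact absurd (h1 ▸ hmF) h2
            · exact Or.inr ⟨h1, h2⟩
      · rw [c4, List.toFinset_cons]
        have : insert m ms.toFinset \ seen.toFinset = ms.toFinset \ seen.toFinset := by
          rw [Finset.insert_sdiff_of_mem _ hmF]
        rw [this]
    · have hmF : m ∉ seen.toFinset := fun h =>
        hm ((PySem.Set.contains_iff _ _).2 (List.mem_toFinset.1 h))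
      rw [if_neg hm]
      obtain ⟨c1, c2, c3, c4⟩ := ih (PySem.Set.add seen m) (size + 1) (nxt ++ [m])
        (PySem.Set.nodup_add _ _ hnd)
      rw [pvSet_add_toFinset] at c2 c3 c4
      refine ⟨c1, ?_, ?_, ?_⟩
      · rw [c2, List.toFinset_cons, Finset.insert_union, Finset.union_insert]
      · intro y
        rw [c3 y, List.toFinset_cons]
        simp only [List.mem_append, List.mem_singleton, Finset.mem_insert]
        constructor
        · rintro ((h | h) | ⟨h1, h2⟩)
          · exact Or.inl h
          · exact Or.inr ⟨Or.inl h, h ▸ hmF⟩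
          · exact Or.inr ⟨Or.inr h1, fun hc => h2 (Or.inr hc)⟩
        · rintro (h | ⟨h1 | h1, h2⟩)
          · exact Or.inl (Or.inl h)
          · exact Or.inl (Or.inr h1)
          · by_cases hy : y = m
            · exact Or.inl (Or.inr hy)
            · exact Or.inr ⟨h1, fun hc => hc.elim hy h2⟩
      · rw [c4, List.toFinset_cons]
        have h1 : ms.toFinset \ insert m seen.toFinset =
            (ms.toFinset \ seen.toFinset).erase m := Finset.sdiff_insert _ _ _
        have h2 : insert m ms.toFinset \ seen.toFinset =
            insert m (ms.toFinset \ seen.toFinset) := Finset.insert_sdiff_of_notMem _ hmF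
        rw [h1, h2]
        by_cases hmm : m ∈ ms.toFinset \ seen.toFinset
        · rw [Finset.card_erase_of_mem hmm, Finset.insert_eq_self.2 hmm]
          have hpos : 1 ≤ (ms.toFinset \ seen.toFinset).card := Finset.card_pos.2 ⟨m, hmm⟩
          rw [Nat.cast_sub hpos]
          push_cast
          ring
        · rw [Finset.erase_eq_self.2 hmm, Finset.card_insert_of_notMem hmm]
          push_cast
          ring


theorem pvBfsRound_spec (grid : List (List String)) (ntc : List (String × List Int))
    (free : List String) (frontier : List String) :
    ∀ (seen : PySem.Set String) (size : Int) (nxt : List String), seen.Nodup →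
    ((pvBfsRound grid ntc free frontier (seen, size, nxt)).1.Nodup ∧
     (pvBfsRound grid ntc free frontier (seen, size, nxt)).1.toFinset =
       seen.toFinset ∪ frontier.toFinset.biUnion (fun x => (pvNbrs grid ntc free x).toFinset) ∧
     (∀ y, y ∈ (pvBfsRound grid ntc free frontier (seen, size, nxt)).2.2 ↔
        y ∈ nxt ∨ (y ∈ (pvBfsRound grid ntc free frontier (seen, size, nxt)).1.toFinset ∧
          y ∉ seen.toFinset)) ∧
     (pvBfsRound grid ntc free frontier (seen, size, nxt)).2.1 =
       size + (((pvBfsRound grid ntc free frontier (seen, size, nxt)).1.toFinset \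
         seen.toFinset).card : Int)) := by
  induction frontier with
  | nil =>
    intro seen size nxt hnd
    refine ⟨hnd, by simp [pvBfsRound], by simp [pvBfsRound], by simp [pvBfsRound]⟩
  | cons x fr ih =>
    intro seen size nxt hnd
    have hfold : pvBfsRound grid ntc free (x :: fr) (seen, size, nxt) =
        pvBfsRound grid ntc free fr
          ((pvNbrs grid ntc free x).foldl (fun (st : PySem.Set String × Int × List String) m =>
            if PySem.Set.contains st.1 m then st
            else (PySem.Set.add st.1 m, st.2.1 + 1, st.2.2 ++ [m])) (seen, size, nxt)) := by
      rfl
    obtain ⟨a1, a2, a3, a4⟩ := pvAddAll_spec (pvNbrs grid ntc free x) seen size nxt hnd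
    set st1 := (pvNbrs grid ntc free x).foldl (fun (st : PySem.Set String × Int × List String) m =>
      if PySem.Set.contains st.1 m then st
      else (PySem.Set.add st.1 m, st.2.1 + 1, st.2.2 ++ [m])) (seen, size, nxt) with hst1
    have hst1e : st1 = (st1.1, st1.2.1, st1.2.2) := rfl
    obtain ⟨b1, b2, b3, b4⟩ := ih st1.1 st1.2.1 st1.2.2 a1
    rw [hfold, hst1e]
    have hsub1 : seen.toFinset ⊆ st1.1.toFinset := by
      rw [a2]; exact Finset.subset_union_left
    have hsub2 : st1.1.toFinset ⊆ (pvBfsRound grid ntc free fr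
        (st1.1, st1.2.1, st1.2.2)).1.toFinset := by
      rw [b2]; exact Finset.subset_union_left
    refine ⟨b1, ?_, ?_, ?_⟩
    · rw [b2, a2, List.toFinset_cons, Finset.biUnion_insert, Finset.union_assoc]
    · intro y
      rw [b3 y, a3 y]
      constructor
      · rintro ((h | ⟨h1, h2⟩) | ⟨h1, h2⟩)
        · exact Or.inl h
        · exact Or.inr ⟨hsub2 (a2 ▸ Finset.mem_union.2 (Or.inr h1)), h2⟩
        · exact Or.inr ⟨h1, fun hc => h2 (hsub1 hc)⟩
      · rintro (h | ⟨h1, h2⟩)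
        · exact Or.inl (Or.inl h)
        · by_cases hy : y ∈ st1.1.toFinset
          · rcases Finset.mem_union.1 (a2 ▸ hy) with h3 | h3
            · exact absurd h3 h2
            · exact Or.inl (Or.inr ⟨h3, h2⟩)
          · exact Or.inr ⟨h1, hy⟩
    · have hK : st1.1.toFinset \ seen.toFinset =
          (pvNbrs grid ntc free x).toFinset \ seen.toFinset := by
        rw [a2, Finset.union_sdiff_left]
      rw [b4, pvCardSdiff seen.toFinset st1.1.toFinset _ hsub1 hsub2, hK, a4]
      push_cast
      ring

theorem pvBfs_spec (grid : List (List String)) (ntc : List (String × List Int))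
    (free : List String) :
    ∀ (fuel : Nat) (seen : PySem.Set String) (size : Int) (frontier : List String)
      (V0 : Finset String) (n : String) (k0 : Int),
    seen.Nodup →
    V0 ⊆ seen.toFinset →
    (∀ b ∈ seen.toFinset, b ∉ V0 → b ∈ pvR (pvNbrs grid ntc free) free.toFinset V0 n) →
    n ∈ seen.toFinset → n ∉ V0 →
    (∀ y ∈ frontier, y ∈ seen.toFinset ∧ y ∉ V0) →
    (∀ y ∈ seen.toFinset, y ∉ V0 → y ∉ frontier →
      ∀ m ∈ pvNbrs grid ntc free y, m ∈ seen.toFinset) →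
    size = k0 + ((seen.toFinset \ V0).card : Int) →
    (if frontier.isEmpty then 1 else (free.toFinset \ seen.toFinset).card + 2) ≤ fuel →
    ((pvBfs grid ntc free fuel seen size frontier).1.Nodup ∧
     (pvBfs grid ntc free fuel seen size frontier).1.toFinset =
       V0 ∪ pvR (pvNbrs grid ntc free) free.toFinset V0 n ∧
     (pvBfs grid ntc free fuel seen size frontier).2 =
       k0 + ((pvR (pvNbrs grid ntc free) free.toFinset V0 n).card : Int)) := by
  have hnb : ∀ x, ∀ m ∈ pvNbrs grid ntc free x, m ∈ free.toFinset := fun x m hm =>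
    List.mem_toFinset.2 (pvNbrs_mem_free grid ntc free x m hm)
  intro fuel
  induction fuel with
  | zero =>
    intro seen size frontier V0 n k0 _ _ _ _ _ _ _ _ hfuel
    split at hfuel <;> omega
  | succ fuel ih =>
    intro seen size frontier V0 n k0 hnd h1 h2 hn hnV0 hfr h3 hsz hfuel
    match frontier with
    | [] =>
      have hReq : pvR (pvNbrs grid ntc free) free.toFinset V0 n = seen.toFinset \ V0 := by
        apply Finset.Subset.antisymm
        · apply pvR_min
          · exact Finset.mem_sdiff.2 ⟨hn, hnV0⟩
          · intro x hxT m hm hmV0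
            rw [Finset.mem_sdiff] at hxT
            exact Finset.mem_sdiff.2
              ⟨h3 x hxT.1 hxT.2 (List.not_mem_nil) m hm, hmV0⟩
        · intro b hb
          rw [Finset.mem_sdiff] at hb
          exact h2 b hb.1 hb.2
      have hout : pvBfs grid ntc free (fuel + 1) seen size [] = (seen, size) := rfl
      rw [hout]
      refine ⟨hnd, ?_, ?_⟩
      · rw [hReq]
        exact (Finset.union_sdiff_of_subset h1).symm
      · rw [hReq, hsz]
    | x :: fr =>
      obtain ⟨r1, r2, r3, r4⟩ := pvBfsRound_spec grid ntc free (x :: fr) seen size [] hnd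
      set rr := pvBfsRound grid ntc free (x :: fr) (seen, size, []) with hrr
      have hout : pvBfs grid ntc free (fuel + 1) seen size (x :: fr) =
          pvBfs grid ntc free fuel rr.1 rr.2.1 rr.2.2 := rfl
      rw [hout]
      have hsub : seen.toFinset ⊆ rr.1.toFinset := by
        rw [r2]; exact Finset.subset_union_left
      have hnew : ∀ y ∈ rr.1.toFinset, y ∉ seen.toFinset →
          ∃ z ∈ x :: fr, y ∈ pvNbrs grid ntc free z := by
        intro y hy hyn
        rcases Finset.mem_union.1 (r2 ▸ hy) with h | h
        · exact absurd h hyn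
        · rcases Finset.mem_biUnion.1 h with ⟨z, hz1, hz2⟩
          exact ⟨z, List.mem_toFinset.1 hz1, List.mem_toFinset.1 hz2⟩
      have h2' : ∀ b ∈ rr.1.toFinset, b ∉ V0 →
          b ∈ pvR (pvNbrs grid ntc free) free.toFinset V0 n := by
        intro b hb hbV0
        by_cases hbs : b ∈ seen.toFinset
        · exact h2 b hbs hbV0
        · rcases hnew b hb hbs with ⟨z, hz1, hz2⟩
          rcases hfr z hz1 with ⟨hz3, hz4⟩
          exact pvR_closed _ _ hnb _ _ _ _ (h2 z hz3 hz4) hz2 hbV0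
      have hfr' : ∀ y ∈ rr.2.2, y ∈ rr.1.toFinset ∧ y ∉ V0 := by
        intro y hy
        rcases (r3 y).1 hy with h | ⟨hy1, hy2⟩
        · exact absurd h (List.not_mem_nil)
        · exact ⟨hy1, fun hc => hy2 (h1 hc)⟩
      have h3' : ∀ y ∈ rr.1.toFinset, y ∉ V0 → y ∉ rr.2.2 →
          ∀ m ∈ pvNbrs grid ntc free y, m ∈ rr.1.toFinset := by
        intro y hy hyV0 hynxt m hm
        by_cases hys : y ∈ seen.toFinset
        · by_cases hyf : y ∈ x :: fr
          · rw [r2]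
            refine Finset.mem_union.2 (Or.inr (Finset.mem_biUnion.2
              ⟨y, List.mem_toFinset.2 hyf, List.mem_toFinset.2 hm⟩))
          · exact hsub (h3 y hys hyV0 hyf m hm)
        · exact absurd ((r3 y).2 (Or.inr ⟨hy, hys⟩)) hynxt
      have hsz' : rr.2.1 = k0 + ((rr.1.toFinset \ V0).card : Int) := by
        rw [r4, hsz, pvCardSdiff V0 seen.toFinset rr.1.toFinset h1 hsub]
        push_cast
        ring
      have hfuel' : (if rr.2.2.isEmpty then 1
          else (free.toFinset \ rr.1.toFinset).card + 2) ≤ fuel := by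
        rw [if_neg (by simp)] at hfuel
        by_cases hnx : rr.2.2.isEmpty
        · rw [if_pos hnx]; omega
        · rw [if_neg hnx]
          rcases List.isEmpty_eq_false_iff_exists_mem.1 (by simpa using hnx) with ⟨y, hy⟩
          rcases hfr' y hy with ⟨hy1, _⟩
          have hyn : y ∉ seen.toFinset := by
            rcases (r3 y).1 hy with h | ⟨_, h2x⟩
            · exact absurd h (List.not_mem_nil)
            · exact h2x
          have hyU : y ∈ free.toFinset := by
            rcases hnew y hy1 hyn with ⟨z, _, hz2⟩
            exact hnb z y hz2
          have hss : free.toFinset \ rr.1.toFinset ⊂ free.toFinset \ seen.toFinset := by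
            refine Finset.ssubset_iff_of_subset (Finset.sdiff_subset_sdiff (Finset.Subset.refl _) hsub) |>.2 ?_
            exact ⟨y, Finset.mem_sdiff.2 ⟨hyU, hyn⟩, fun hc => (Finset.mem_sdiff.1 hc).2 hy1⟩
          have := Finset.card_lt_card hss
          omega
      exact ih rr.1 rr.2.1 rr.2.2 V0 n k0 r1 (h1.trans hsub) h2' (hsub hn) hnV0 hfr' h3' hsz' hfuel'


-- ---- the two outer seed loops against the canonical fold pvRun ----

theorem pvAcc_singleton (nb : String → List String) (U V : Finset String) (n : String)
    (hn : n ∉ V) : pvAcc nb U V [n] = pvR nb U V n := by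
  ext b
  rw [pvAcc_mem]
  constructor
  · rintro ⟨a, ha1, _, ha3⟩
    rcases List.mem_singleton.1 ha1 with rfl
    exact ha3
  · intro hb
    exact ⟨n, List.mem_singleton_self n, hn, hb⟩

theorem pvRun_cons (nb : String → List String) (U : Finset String) (n : String)
    (l : List String) (st : List Int × Finset String) :
    pvRun nb U (n :: l) st = pvRun nb U l (if n ∈ st.2 then st
      else (st.1 ++ [((pvR nb U st.2 n).card : Int)], st.2 ∪ pvR nb U st.2 n)) := rfl

theorem pvRun_cons_mem (nb : String → List String) (U : Finset String) (n : String)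
    (l : List String) (st : List Int × Finset String) (hn : n ∈ st.2) :
    pvRun nb U (n :: l) st = pvRun nb U l st := by
  rw [pvRun_cons, if_pos hn]

theorem pvRun_cons_new (nb : String → List String) (U : Finset String) (n : String)
    (l : List String) (st : List Int × Finset String) (hn : n ∉ st.2) :
    pvRun nb U (n :: l) st = pvRun nb U l
      (st.1 ++ [((pvR nb U st.2 n).card : Int)], st.2 ∪ pvR nb U st.2 n) := by
  rw [pvRun_cons, if_neg hn]

theorem pvFoldA (grid : List (List String)) (ntc : List (String × List Int))
    (free : List String) :
    ∀ (l : List String) (comps : List Int) (visited : PySem.Set String),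
    visited.Nodup → (∀ y ∈ l, y ∈ free) →
    ((l.foldl (fun (st : List Int × PySem.Set String) node =>
        if PySem.Set.contains st.2 node then st
        else
          let r := pvDfs grid ntc free (9 * free.length + 2) [node] st.2 0
          (st.1 ++ [r.2], r.1)) (comps, visited)).1 =
      (pvRun (pvNbrs grid ntc free) free.toFinset l (comps, visited.toFinset)).1 ∧
     (l.foldl (fun (st : List Int × PySem.Set String) node =>
        if PySem.Set.contains st.2 node then st
        else
          let r := pvDfs grid ntc free (9 * free.length + 2) [node] st.2 0
          (st.1 ++ [r.2], r.1)) (comps, visited)).2.toFinset =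
      (pvRun (pvNbrs grid ntc free) free.toFinset l (comps, visited.toFinset)).2 ∧
     (l.foldl (fun (st : List Int × PySem.Set String) node =>
        if PySem.Set.contains st.2 node then st
        else
          let r := pvDfs grid ntc free (9 * free.length + 2) [node] st.2 0
          (st.1 ++ [r.2], r.1)) (comps, visited)).2.Nodup) := by
  intro l
  induction l with
  | nil => intro comps visited hnd _; exact ⟨rfl, rfl, hnd⟩
  | cons n l ih =>
    intro comps visited hnd hl
    by_cases hc : PySem.Set.contains visited n = true
    · have hcF : n ∈ visited.toFinset :=
        List.mem_toFinset.2 ((PySem.Set.contains_iff _ _).1 hc)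
      have hstep : (if PySem.Set.contains (comps, visited).2 n = true then (comps, visited)
          else
            let r := pvDfs grid ntc free (9 * free.length + 2) [n] (comps, visited).2 0
            ((comps, visited).1 ++ [r.2], r.1)) = (comps, visited) := by
        show (if PySem.Set.contains visited n = true then (comps, visited)
          else
            let r := pvDfs grid ntc free (9 * free.length + 2) [n] visited 0
            (comps ++ [r.2], r.1)) = (comps, visited)
        rw [if_pos hc]
      rw [List.foldl_cons, hstep, pvRun_cons_mem _ _ _ _ _ hcF]
      exact ih comps visited hnd (fun y hy => hl y (List.mem_cons_of_mem _ hy))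
    · have hcF : n ∉ visited.toFinset := fun h =>
        hc ((PySem.Set.contains_iff _ _).2 (List.mem_toFinset.1 h))
      have hnf : n ∈ free := hl n List.mem_cons_self
      have hstep : (if PySem.Set.contains (comps, visited).2 n = true then (comps, visited)
          else
            let r := pvDfs grid ntc free (9 * free.length + 2) [n] (comps, visited).2 0
            ((comps, visited).1 ++ [r.2], r.1)) =
          (comps ++ [(pvDfs grid ntc free (9 * free.length + 2) [n] visited 0).2],
           (pvDfs grid ntc free (9 * free.length + 2) [n] visited 0).1) := by
        show (if PySem.Set.contains visited n = true then (comps, visited)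
          else
            let r := pvDfs grid ntc free (9 * free.length + 2) [n] visited 0
            (comps ++ [r.2], r.1)) = _
        rw [if_neg hc]
      have hfuel : [n].length + 9 * (free.toFinset \ visited.toFinset).card + 1 ≤
          9 * free.length + 2 := by
        have h1 : (free.toFinset \ visited.toFinset).card ≤ free.toFinset.card :=
          Finset.card_le_card (Finset.sdiff_subset)
        have h2 : free.toFinset.card ≤ free.length := free.toFinset_card_le
        simp only [List.length_singleton]
        omega
      obtain ⟨d1, d2, d3⟩ := pvDfs_spec grid ntc free (9 * free.length + 2) [n] visited 0
        hnd (by intro y hy; rcases List.mem_singleton.1 hy with rfl; exact hnf) hfuel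
      rw [pvAcc_singleton _ _ _ _ hcF] at d2 d3
      have hd3 : (pvDfs grid ntc free (9 * free.length + 2) [n] visited 0).2 =
          ((pvR (pvNbrs grid ntc free) free.toFinset visited.toFinset n).card : Int) := by
        rw [d3]; ring
      rw [List.foldl_cons, hstep, pvRun_cons_new _ _ _ _ _ hcF]
      rw [← hd3, ← d2]
      exact ih
        (comps ++ [(pvDfs grid ntc free (9 * free.length + 2) [n] visited 0).2])
        (pvDfs grid ntc free (9 * free.length + 2) [n] visited 0).1 d1
        (fun y hy => hl y (List.mem_cons_of_mem _ hy))

theorem pvFoldB (grid : List (List String)) (ntc : List (String × List Int))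
    (free : List String) :
    ∀ (l : List String) (sizes : List Int) (seen : PySem.Set String),
    seen.Nodup →
    ((l.foldl (fun (st : PySem.Set String × List Int) n =>
        if !(PySem.Set.contains free n) || PySem.Set.contains st.1 n then st
        else
          let r := pvBfs grid ntc free (free.length + 2) (PySem.Set.add st.1 n) 1 [n]
          (r.1, st.2 ++ [r.2])) (seen, sizes)).2 =
      (pvRun (pvNbrs grid ntc free) free.toFinset
        (l.filter (fun n => PySem.Set.contains free n)) (sizes, seen.toFinset)).1 ∧
     (l.foldl (fun (st : PySem.Set String × List Int) n =>
        if !(PySem.Set.contains free n) || PySem.Set.contains st.1 n then st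
        else
          let r := pvBfs grid ntc free (free.length + 2) (PySem.Set.add st.1 n) 1 [n]
          (r.1, st.2 ++ [r.2])) (seen, sizes)).1.toFinset =
      (pvRun (pvNbrs grid ntc free) free.toFinset
        (l.filter (fun n => PySem.Set.contains free n)) (sizes, seen.toFinset)).2 ∧
     (l.foldl (fun (st : PySem.Set String × List Int) n =>
        if !(PySem.Set.contains free n) || PySem.Set.contains st.1 n then st
        else
          let r := pvBfs grid ntc free (free.length + 2) (PySem.Set.add st.1 n) 1 [n]
          (r.1, st.2 ++ [r.2])) (seen, sizes)).1.Nodup) := by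
  have hnb : ∀ x, ∀ m ∈ pvNbrs grid ntc free x, m ∈ free.toFinset := fun x m hm =>
    List.mem_toFinset.2 (pvNbrs_mem_free grid ntc free x m hm)
  intro l
  induction l with
  | nil => intro sizes seen hnd; exact ⟨rfl, rfl, hnd⟩
  | cons n l ih =>
    intro sizes seen hnd
    by_cases hf : PySem.Set.contains free n = true
    · have hnfm : n ∈ free := (PySem.Set.contains_iff _ _).1 hf
      have hfil : List.filter (fun n => PySem.Set.contains free n) (n :: l) =
          n :: List.filter (fun n => PySem.Set.contains free n) l := by
        simp [hnfm]
      rw [hfil]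
      by_cases hc : PySem.Set.contains seen n = true
      · have hcF : n ∈ seen.toFinset :=
          List.mem_toFinset.2 ((PySem.Set.contains_iff _ _).1 hc)
        have hstep : (if (!(PySem.Set.contains free n) ||
              PySem.Set.contains (seen, sizes).1 n) = true then (seen, sizes)
            else
              let r := pvBfs grid ntc free (free.length + 2)
                (PySem.Set.add (seen, sizes).1 n) 1 [n]
              (r.1, (seen, sizes).2 ++ [r.2])) = (seen, sizes) := by
          show (if (!(PySem.Set.contains free n) || PySem.Set.contains seen n) = true
            then (seen, sizes)
            else
              let r := pvBfs grid ntc free (free.length + 2) (PySem.Set.add seen n) 1 [n]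
              (r.1, sizes ++ [r.2])) = (seen, sizes)
          rw [if_pos (by rw [hc]; simp)]
        rw [List.foldl_cons, hstep, pvRun_cons_mem _ _ _ _ _ hcF]
        exact ih sizes seen hnd
      · have hcF : n ∉ seen.toFinset := fun h =>
          hc ((PySem.Set.contains_iff _ _).2 (List.mem_toFinset.1 h))
        have hc' : PySem.Set.contains seen n = false := by simpa using hc
        have hstep : (if (!(PySem.Set.contains free n) ||
              PySem.Set.contains (seen, sizes).1 n) = true then (seen, sizes)
            else
              let r := pvBfs grid ntc free (free.length + 2)
                (PySem.Set.add (seen, sizes).1 n) 1 [n]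
              (r.1, (seen, sizes).2 ++ [r.2])) =
            ((pvBfs grid ntc free (free.length + 2) (PySem.Set.add seen n) 1 [n]).1,
             sizes ++ [(pvBfs grid ntc free (free.length + 2) (PySem.Set.add seen n) 1
               [n]).2]) := by
          show (if (!(PySem.Set.contains free n) || PySem.Set.contains seen n) = true
            then (seen, sizes)
            else
              let r := pvBfs grid ntc free (free.length + 2) (PySem.Set.add seen n) 1 [n]
              (r.1, sizes ++ [r.2])) = _
          rw [if_neg (by rw [hf, hc']; simp)]
        have hseen' : (PySem.Set.add seen n).toFinset = insert n seen.toFinset :=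
          pvSet_add_toFinset seen n
        have hfuel : (if ([n] : List String).isEmpty then 1
            else (free.toFinset \ (PySem.Set.add seen n).toFinset).card + 2) ≤
            free.length + 2 := by
          rw [if_neg (by simp)]
          have h1 : (free.toFinset \ (PySem.Set.add seen n).toFinset).card ≤
              free.toFinset.card := Finset.card_le_card (Finset.sdiff_subset)
          have h2 : free.toFinset.card ≤ free.length := free.toFinset_card_le
          omega
        obtain ⟨b1, b2, b3⟩ := pvBfs_spec grid ntc free (free.length + 2)
          (PySem.Set.add seen n) 1 [n] seen.toFinset n 0
          (PySem.Set.nodup_add _ _ hnd)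
          (by rw [hseen']; exact Finset.subset_insert _ _)
          (by
            intro b hb hbV
            rw [hseen', Finset.mem_insert] at hb
            rcases hb with rfl | hb
            · exact pvR_self _ _ _ _
            · exact absurd hb hbV)
          (by rw [hseen']; exact Finset.mem_insert_self _ _)
          hcF
          (by
            intro y hy
            rcases List.mem_singleton.1 hy with rfl
            exact ⟨by rw [hseen']; exact Finset.mem_insert_self _ _, hcF⟩)
          (by
            intro y hy hyV hyfr
            rw [hseen', Finset.mem_insert] at hy
            rcases hy with rfl | hy
            · exact absurd (List.mem_singleton_self y) hyfr
            · exact absurd hy hyV)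
          (by
            rw [hseen', Finset.insert_sdiff_of_notMem _ hcF,
              Finset.sdiff_eq_empty_iff_subset.2 (Finset.Subset.refl _)]
            simp)
          hfuel
        have hb3 : (pvBfs grid ntc free (free.length + 2) (PySem.Set.add seen n) 1
            [n]).2 = ((pvR (pvNbrs grid ntc free) free.toFinset seen.toFinset n).card
              : Int) := by
          rw [b3]; ring
        rw [List.foldl_cons, hstep, pvRun_cons_new _ _ _ _ _ hcF]
        rw [← hb3, ← b2]
        exact ih
          (sizes ++ [(pvBfs grid ntc free (free.length + 2) (PySem.Set.add seen n) 1
            [n]).2])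
          (pvBfs grid ntc free (free.length + 2) (PySem.Set.add seen n) 1 [n]).1 b1
    · have hf' : PySem.Set.contains free n = false := by simpa using hf
      have hnfm : n ∉ free := fun h => hf ((PySem.Set.contains_iff _ _).2 h)
      have hfil : List.filter (fun n => PySem.Set.contains free n) (n :: l) =
          List.filter (fun n => PySem.Set.contains free n) l := by
        simp [hnfm]
      have hstep : (if (!(PySem.Set.contains free n) ||
            PySem.Set.contains (seen, sizes).1 n) = true then (seen, sizes)
          else
            let r := pvBfs grid ntc free (free.length + 2)
              (PySem.Set.add (seen, sizes).1 n) 1 [n]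
            (r.1, (seen, sizes).2 ++ [r.2])) = (seen, sizes) := by
        show (if (!(PySem.Set.contains free n) || PySem.Set.contains seen n) = true
          then (seen, sizes)
          else
            let r := pvBfs grid ntc free (free.length + 2) (PySem.Set.add seen n) 1 [n]
            (r.1, sizes ++ [r.2])) = (seen, sizes)
        rw [if_pos (by rw [hf']; simp)]
      rw [List.foldl_cons, hstep, hfil]
      exact ih sizes seen hnd

-- ---- dedup bookkeeping: B's grid stream visits exactly A's free list ----

theorem pvDiscard_filter (p : String → Bool) (s : List String) (x : String) :
    PySem.Set.discard (s.filter p) x = (PySem.Set.discard s x).filter p := by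
  show (s.filter p).filter (fun y => !(y == x)) = ((s.filter (fun y => !(y == x)))).filter p
  rw [List.filter_filter, List.filter_filter]
  exact List.filter_congr (fun y _ => Bool.and_comm _ _)

theorem pvDedup_filter (p : String → Bool) (l : List String) :
    PySem.List.dedup (l.filter p) = (PySem.List.dedup l).filter p := by
  simp only [PySem.List.dedup_eq_ofList]
  induction l with
  | nil => rfl
  | cons x l ih =>
    rw [List.filter_cons]
    by_cases hp : p x = true
    · rw [if_pos (by rw [hp]), PySem.Set.ofList_cons, PySem.Set.ofList_cons, ih,
        List.filter_cons, if_pos (by rw [hp]), pvDiscard_filter]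
    · have hp' : p x = false := by simpa using hp
      rw [if_neg (by rw [hp']; simp), ih, PySem.Set.ofList_cons, List.filter_cons,
        if_neg (by rw [hp']; simp)]
      show _ = ((PySem.Set.ofList l).filter (fun y => !(y == x))).filter p
      rw [List.filter_filter]
      refine (List.filter_congr ?_).symm
      intro y _
      by_cases hyx : y = x
      · subst hyx; simp [hp']
      · simp [hyx]

theorem pvRun_skip (nb : String → List String) (U : Finset String) (x : String) :
    ∀ (l : List String) (st : List Int × Finset String), x ∈ st.2 →
    pvRun nb U (l.filter (fun y => !(y == x))) st = pvRun nb U l st := by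
  intro l
  induction l with
  | nil => intro st _; rfl
  | cons y l ih =>
    intro st hx
    rw [List.filter_cons]
    by_cases hyx : y = x
    · subst hyx
      rw [if_neg (by simp), pvRun_cons_mem _ _ _ _ _ hx]
      exact ih st hx
    · rw [if_pos (by simp [hyx])]
      by_cases hy : y ∈ st.2
      · rw [pvRun_cons_mem _ _ _ _ _ hy, pvRun_cons_mem _ _ _ _ _ hy]
        exact ih st hx
      · rw [pvRun_cons_new _ _ _ _ _ hy, pvRun_cons_new _ _ _ _ _ hy]
        exact ih _ (Finset.mem_union.2 (Or.inl hx))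

theorem pvRun_dedup (nb : String → List String) (U : Finset String) :
    ∀ (l : List String) (st : List Int × Finset String),
    pvRun nb U (PySem.List.dedup l) st = pvRun nb U l st := by
  intro l
  induction l with
  | nil => intro st; rfl
  | cons x l ih =>
    intro st
    rw [PySem.List.dedup_eq_ofList, PySem.Set.ofList_cons]
    have hd : (PySem.Set.discard (PySem.Set.ofList l) x : List String) =
        (PySem.List.dedup l).filter (fun y => !(y == x)) := by
      rw [PySem.List.dedup_eq_ofList]
      rfl
    by_cases hx : x ∈ st.2
    · rw [pvRun_cons_mem _ _ _ _ _ hx, pvRun_cons_mem _ _ _ _ _ hx, hd,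
        pvRun_skip nb U x _ st hx, ih]
    · rw [pvRun_cons_new _ _ _ _ _ hx, pvRun_cons_new _ _ _ _ _ hx, hd,
        pvRun_skip nb U x _ _ (Finset.mem_union.2 (Or.inr (pvR_self _ _ _ _))), ih]

theorem pvFlat_filter_eq_free (path : List String) (grid : List (List String)) :
    (PySem.List.dedup ((pvFlat grid).filter
      (fun n => PySem.Set.contains (pvFree path grid) n))) = pvFree path grid := by
  rw [pvDedup_filter]
  have hfree : pvFree path grid =
      (PySem.List.dedup (pvFlat grid)).filter (fun y => !(path.contains y)) := by
    rw [PySem.List.dedup_eq_ofList]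
    rfl
  have hiff : ∀ y, y ∈ PySem.List.dedup (pvFlat grid) →
      ((PySem.Set.contains (pvFree path grid) y = true) ↔
        ((!(path.contains y)) = true)) := by
    intro y hy
    rw [PySem.Set.contains_iff]
    constructor
    · intro h
      rw [hfree, List.mem_filter] at h
      exact h.2
    · intro h
      rw [hfree, List.mem_filter]
      exact ⟨hy, h⟩
  conv_rhs => rw [hfree]
  refine List.filter_congr ?_
  intro y hy
  cases h1 : PySem.Set.contains (pvFree path grid) y
  · cases h2 : (!(path.contains y))
    · rfl
    · exact absurd ((hiff y hy).2 h2) (by rw [h1]; simp)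
  · rw [(hiff y hy).1 h1]

theorem pvFoldl_flatten (l : List (List String)) (f : PySem.Set String × List Int →
    String → PySem.Set String × List Int) (init : PySem.Set String × List Int) :
    l.foldl (fun a r => r.foldl f a) init = (pvFlat l).foldl f init := by
  induction l generalizing init with
  | nil => rfl
  | cons h t ih =>
    show (t.foldl (fun a r => r.foldl f a) (h.foldl f init)) = _
    rw [ih]
    have : pvFlat (h :: t) = h ++ pvFlat t := by simp [pvFlat]
    rw [this, List.foldl_append]

theorem pvPorts_eq (path : List String) (grid : List (List String))
    (node_to_coord : List (String × List Int)) (remaining_strands : List Int)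
    (min_free : Int) :
    check_spangram_separation_rule path grid node_to_coord remaining_strands min_free =
    check_spangram_separation_rule_alt path grid node_to_coord remaining_strands
      min_free := by
  obtain ⟨a1, _, _⟩ := pvFoldA grid node_to_coord (pvFree path grid) (pvFree path grid)
    [] PySem.Set.empty List.nodup_nil (fun y hy => hy)
  obtain ⟨b1, _, _⟩ := pvFoldB grid node_to_coord (pvFree path grid) (pvFlat grid)
    [] PySem.Set.empty List.nodup_nil
  have hchain : pvRun (pvNbrs grid node_to_coord (pvFree path grid))
      (pvFree path grid).toFinset
      ((pvFlat grid).filter (fun n => PySem.Set.contains (pvFree path grid) n))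
      ([], PySem.Set.empty.toFinset) =
      pvRun (pvNbrs grid node_to_coord (pvFree path grid)) (pvFree path grid).toFinset
        (pvFree path grid) ([], PySem.Set.empty.toFinset) := by
    rw [← pvRun_dedup (pvNbrs grid node_to_coord (pvFree path grid))
      (pvFree path grid).toFinset
      ((pvFlat grid).filter (fun n => PySem.Set.contains (pvFree path grid) n))
      ([], PySem.Set.empty.toFinset), pvFlat_filter_eq_free]
  have hcomps : ((pvFree path grid).foldl (fun (st : List Int × PySem.Set String) node =>
      if PySem.Set.contains st.2 node then st
      else
        let r := pvDfs grid node_to_coord (pvFree path grid)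
          (9 * (pvFree path grid).length + 2) [node] st.2 0
        (st.1 ++ [r.2], r.1)) ([], PySem.Set.empty)).1 =
      (grid.foldl (fun st row =>
        row.foldl (fun (st : PySem.Set String × List Int) n =>
          if !(PySem.Set.contains (pvFree path grid) n) || PySem.Set.contains st.1 n
          then st
          else
            let r := pvBfs grid node_to_coord (pvFree path grid)
              ((pvFree path grid).length + 2) (PySem.Set.add st.1 n) 1 [n]
            (r.1, st.2 ++ [r.2])) st) (PySem.Set.empty, [])).2 := by
    rw [a1, pvFoldl_flatten, b1, hchain]
  show (if ((pvFree path grid).foldl (fun (st : List Int × PySem.Set String) node =>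
      if PySem.Set.contains st.2 node then st
      else
        let r := pvDfs grid node_to_coord (pvFree path grid)
          (9 * (pvFree path grid).length + 2) [node] st.2 0
        (st.1 ++ [r.2], r.1)) ([], PySem.Set.empty)).1.length ≠ 2 then false
    else if ((pvFree path grid).foldl (fun (st : List Int × PySem.Set String) node =>
      if PySem.Set.contains st.2 node then st
      else
        let r := pvDfs grid node_to_coord (pvFree path grid)
          (9 * (pvFree path grid).length + 2) [node] st.2 0
        (st.1 ++ [r.2], r.1)) ([], PySem.Set.empty)).1.any
        (fun s => decide (s < min_free)) then false
    else if ¬ pvCanPartition ((pvFree path grid).foldl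
        (fun (st : List Int × PySem.Set String) node =>
      if PySem.Set.contains st.2 node then st
      else
        let r := pvDfs grid node_to_coord (pvFree path grid)
          (9 * (pvFree path grid).length + 2) [node] st.2 0
        (st.1 ++ [r.2], r.1)) ([], PySem.Set.empty)).1 remaining_strands then false
    else true) =
    (if (grid.foldl (fun st row =>
        row.foldl (fun (st : PySem.Set String × List Int) n =>
          if !(PySem.Set.contains (pvFree path grid) n) || PySem.Set.contains st.1 n
          then st
          else
            let r := pvBfs grid node_to_coord (pvFree path grid)
              ((pvFree path grid).length + 2) (PySem.Set.add st.1 n) 1 [n]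
            (r.1, st.2 ++ [r.2])) st) (PySem.Set.empty, [])).2.length ≠ 2 then false
    else if (grid.foldl (fun st row =>
        row.foldl (fun (st : PySem.Set String × List Int) n =>
          if !(PySem.Set.contains (pvFree path grid) n) || PySem.Set.contains st.1 n
          then st
          else
            let r := pvBfs grid node_to_coord (pvFree path grid)
              ((pvFree path grid).length + 2) (PySem.Set.add st.1 n) 1 [n]
            (r.1, st.2 ++ [r.2])) st) (PySem.Set.empty, [])).2.any
        (fun s => decide (s < min_free)) then false
    else if ¬ pvCanPartition (grid.foldl (fun st row =>
        row.foldl (fun (st : PySem.Set String × List Int) n =>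
          if !(PySem.Set.contains (pvFree path grid) n) || PySem.Set.contains st.1 n
          then st
          else
            let r := pvBfs grid node_to_coord (pvFree path grid)
              ((pvFree path grid).length + 2) (PySem.Set.add st.1 n) 1 [n]
            (r.1, st.2 ++ [r.2])) st) (PySem.Set.empty, [])).2 remaining_strands
      then false
    else true)
  rw [hcomps]

-- ===== VERDICT (by name: the statement is the Claim_ definition above) =====
theorem check_spangram_separation_rule_spec : Claim_equal_check_spangram_separation_rule := by
  intro path grid node_to_coord remaining_strands min_free _hdom _hpre
  unfold Spec_check_spangram_separation_rule
  exact pvPorts_eq path grid node_to_coord remaining_strands min_free
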